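-- pv_equiv track=rewrite | github.com/xjtu-robocup2024/CUI-JIAYAO | day4.py | day4_zuoye2
-- ===== SOURCE A (Python) =====
-- def day4_zuoye2(arr, num):
--     new_arr = []
--     for i in range(len(arr)):
--         if arr[i] > num:
--             new_arr.extend(arr[:i])
--             new_arr.append(num)
--             new_arr.extend(arr[i:])
--             break
--     else:
--         new_arr.extend(arr)
--         new_arr.append(num)
--
--     return new_arr
-- ===== SOURCE B (Python) =====
-- def day4_zuoye2(arr, num):
--     result = []
--     inserted = False
--     for x in arr:
--         if not inserted and x > num:
--             result.append(num)
--             inserted = True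
--         result.append(x)
--     if not inserted:
--         result.append(num)
--     return result
-- ===== Notes on version B (the rewrite author's own statement) =====
-- stated objective: simpler
-- what changed: Replaces A's index search followed by slice concatenations (arr[:i], arr[i:]) with a single streaming pass that appends elements and inserts num the first time a strictly greater element is seen, tracked by a flag.
import Mathlib
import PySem

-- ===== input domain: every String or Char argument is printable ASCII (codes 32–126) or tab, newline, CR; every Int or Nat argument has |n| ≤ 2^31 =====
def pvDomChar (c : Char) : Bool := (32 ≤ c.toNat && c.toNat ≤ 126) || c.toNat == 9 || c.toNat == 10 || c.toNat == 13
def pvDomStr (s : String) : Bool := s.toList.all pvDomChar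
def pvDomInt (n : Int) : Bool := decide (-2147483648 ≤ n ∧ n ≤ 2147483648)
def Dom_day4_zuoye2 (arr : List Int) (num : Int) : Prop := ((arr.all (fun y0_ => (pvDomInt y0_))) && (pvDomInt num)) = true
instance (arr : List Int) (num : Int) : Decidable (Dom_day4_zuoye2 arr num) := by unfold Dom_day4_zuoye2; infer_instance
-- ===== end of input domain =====

-- B replaces A's index-search-then-slice-concatenation with a single streaming pass using an inserted flag (simpler decomposition, same O(n) cost).


-- ===== PORT A =====
-- the 'for i in range(len(arr)) … break / else' loop, as recursion on the index i;
-- arr[:i] / arr[i:] with 0 ≤ i are exactly List.take i / List.drop i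
def day4_zuoye2_go (arr : List Int) (num : Int) (i : Nat) : List Int :=
  if h : i < arr.length then
    if arr[i] > num then (arr.take i) ++ [num] ++ (arr.drop i)
    else day4_zuoye2_go arr num (i + 1)
  else arr ++ [num]
termination_by arr.length - i

def day4_zuoye2 (arr : List Int) (num : Int) : List Int :=
  day4_zuoye2_go arr num 0

-- ===== PORT B =====
-- one pass with an 'inserted' flag; state = (result, inserted)
def day4_zuoye2_alt (arr : List Int) (num : Int) : List Int :=
  let st := arr.foldl (fun (p : List Int × Bool) x =>
    if !p.2 && decide (x > num) then (p.1 ++ [num, x], true) else (p.1 ++ [x], p.2))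
    ([], false)
  if st.2 then st.1 else st.1 ++ [num]

-- ===== PRECONDITION & SPEC =====
def Spec_day4_zuoye2 (arr : List Int) (num : Int) (out : List Int) : Prop := out = day4_zuoye2_alt arr num
instance (arr : List Int) (num : Int) (out : List Int) : Decidable (Spec_day4_zuoye2 arr num out) := by unfold Spec_day4_zuoye2; infer_instance

-- ===== CLAIM (what is proved, stated in full; the proofs are below) =====
def Claim_equal_day4_zuoye2 : Prop := ∀ (arr : List Int) (num : Int), Dom_day4_zuoye2 arr num → Spec_day4_zuoye2 arr num (day4_zuoye2 arr num)

-- ===== LEMMAS AND PROOFS =====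

-- canonical "insert num before the first strictly greater element" used to bridge the two ports
def insCanon (num : Int) : List Int → List Int
  | [] => [num]
  | x :: xs => if x > num then num :: x :: xs else x :: insCanon num xs

theorem go_eq_insCanon (arr : List Int) (num : Int) (i : Nat) :
    day4_zuoye2_go arr num i = arr.take i ++ insCanon num (arr.drop i) := by
  fun_induction day4_zuoye2_go arr num i with
  | case1 i h hgt =>
      rw [List.drop_eq_getElem_cons h, insCanon, if_pos hgt]
      simp
  | case2 i h hle ih =>
      rw [ih, List.drop_eq_getElem_cons h, insCanon]
      rw [if_neg hle, List.take_add_one, List.getElem?_eq_getElem h]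
      simp only [Option.toList_some, List.append_assoc, List.singleton_append]
  | case3 i h =>
      have hlen : arr.length ≤ i := Nat.le_of_not_lt h
      simp [List.take_of_length_le hlen, List.drop_of_length_le hlen, insCanon]

theorem foldl_flag_true (num : Int) (xs : List Int) (acc : List Int) :
    xs.foldl (fun (p : List Int × Bool) x =>
      if !p.2 && decide (x > num) then (p.1 ++ [num, x], true) else (p.1 ++ [x], p.2))
      (acc, true) = (acc ++ xs, true) := by
  induction xs generalizing acc with
  | nil => simp
  | cons x xs ih =>
      rw [List.foldl_cons, show (if !(true : Bool) && decide (x > num) then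
          ((acc : List Int) ++ [num, x], true) else (acc ++ [x], true)) = (acc ++ [x], true) by
          simp]
      simpa using ih (acc ++ [x])

theorem foldl_flag_false (num : Int) (xs : List Int) (acc : List Int) :
    (let st := xs.foldl (fun (p : List Int × Bool) x =>
        if !p.2 && decide (x > num) then (p.1 ++ [num, x], true) else (p.1 ++ [x], p.2))
        (acc, false)
     if st.2 then st.1 else st.1 ++ [num]) = acc ++ insCanon num xs := by
  induction xs generalizing acc with
  | nil => simp [insCanon]
  | cons x xs ih =>
      by_cases hx : x > num
      · rw [List.foldl_cons, show (if !(false : Bool) && decide (x > num) then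
            (acc ++ [num, x], true) else (acc ++ [x], false)) = (acc ++ [num, x], true) by
            simp [hx], foldl_flag_true]
        simp [insCanon, hx]
      · simpa [List.foldl_cons, hx, insCanon] using ih (acc ++ [x])

-- ===== VERDICT (by name: the statement is the Claim_ definition above) =====
theorem day4_zuoye2_spec : Claim_equal_day4_zuoye2 := by
  intro arr num _
  unfold Spec_day4_zuoye2 day4_zuoye2 day4_zuoye2_alt
  rw [go_eq_insCanon]
  simpa using (foldl_flag_false num arr []).symm
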